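-- pv_equiv track=rewrite | github.com/Joanna-O-Ben/Rosalind-Bioinformatics-Stronghold-Homework-4-and-5 | cons.py | consensuscount
-- ===== SOURCE A (Python) =====
-- def consensuscount(fragmentarray, position):
--     basecount = [0, 0, 0, 0]
--     for frag in fragmentarray:
--         if frag[position] == "A":
--             basecount[0] += 1
--         if frag[position] == "C":
--             basecount[1] += 1
--         if frag[position] == "G":
--             basecount[2] += 1
--         if frag[position] == "T":
--             basecount[3] += 1
--     return basecount.index(max(basecount))
-- ===== SOURCE B (Python) =====
-- def consensuscount(fragmentarray, position):
--     # Sort the column's A/C/G/T characters: equal bases become adjacent runs,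
--     # and runs appear in ASCII order, which is exactly "ACGT" order.
--     col = sorted(frag[position] for frag in fragmentarray if frag[position] in "ACGT")
--     best_base = None
--     best_len = 0
--     i = 0
--     while i < len(col):
--         j = i
--         while j < len(col) and col[j] == col[i]:
--             j += 1
--         if j - i > best_len:  # strict: ties keep the earlier (smaller-ASCII) base
--             best_base = col[i]
--             best_len = j - i
--         i = j
--     return 0 if best_base is None else "ACGT".index(best_base)
-- ===== Notes on version B (the rewrite author's own statement) =====
-- stated objective: alternative
-- what changed: Replaces the fused four-counter loop plus list argmax by a different algorithm: sort the column's A/C/G/T characters (runs come out in ASCII = ACGT order) and scan for the first strictly-longest run, mapping the winning base back to its ACGT index.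
import Mathlib
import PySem

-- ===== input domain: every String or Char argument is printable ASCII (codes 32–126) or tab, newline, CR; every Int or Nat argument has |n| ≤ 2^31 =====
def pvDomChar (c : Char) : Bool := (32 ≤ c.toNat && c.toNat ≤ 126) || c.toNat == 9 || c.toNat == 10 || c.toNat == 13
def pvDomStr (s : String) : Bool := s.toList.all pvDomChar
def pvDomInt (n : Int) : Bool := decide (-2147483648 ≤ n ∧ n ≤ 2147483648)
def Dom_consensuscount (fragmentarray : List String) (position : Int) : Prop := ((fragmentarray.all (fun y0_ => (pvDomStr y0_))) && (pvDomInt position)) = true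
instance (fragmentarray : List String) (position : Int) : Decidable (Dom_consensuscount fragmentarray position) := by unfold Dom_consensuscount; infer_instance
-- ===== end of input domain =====

-- B replaces A's fused counting loop + argmax by sort-then-longest-run: sort the column's A/C/G/T
-- characters (runs appear in ASCII = "ACGT" order) and scan for the first longest run (alternative, same cost).

-- ===== PORT A =====
-- one loop iteration: the four independent 'if frag[position] == X' increments on the list basecount
-- (frag[position] is PySem.Str.pyGet?; the 'none' branch is Python's IndexError, excluded by Pre_)
def consensusStep (position : Int) (bc : List Int) (frag : String) : List Int :=
  match PySem.Str.pyGet? frag position with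
  | none => bc
  | some c =>
    let bc := if c == 'A' then bc.set 0 (bc.getD 0 0 + 1) else bc
    let bc := if c == 'C' then bc.set 1 (bc.getD 1 0 + 1) else bc
    let bc := if c == 'G' then bc.set 2 (bc.getD 2 0 + 1) else bc
    let bc := if c == 'T' then bc.set 3 (bc.getD 3 0 + 1) else bc
    bc

def consensuscount (fragmentarray : List String) (position : Int) : Int :=
  let basecount := fragmentarray.foldl (consensusStep position) [0, 0, 0, 0]
  -- basecount.index(max(basecount)); basecount always has 4 elements, so neither max nor index raises
  (((PySem.List.index? basecount ((PySem.List.max? basecount (fun x => x)).getD 0)).getD 0 : Nat) : Int)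

-- ===== PORT B =====
-- the two nested while loops of Source B: consume the run starting at the head (the inner while over
-- 'col[j] == col[i]' is takeWhile/dropWhile), update (best_base, best_len) on a strictly longer run,
-- continue at i = j
def consensusRuns : List Char → Option Char × Int → Option Char × Int
  | [], best => best
  | c :: rest, (b, n) =>
      let run : Int := 1 + (rest.takeWhile (fun x => x == c)).length
      let rest' := rest.dropWhile (fun x => x == c)
      consensusRuns rest' (if run > n then (some c, run) else (b, n))
  termination_by col _ => col.length
  decreasing_by
    have := List.length_dropWhile_le (fun x => x == c) rest
    simp only [List.length_cons]; omega

def consensuscount_alt (fragmentarray : List String) (position : Int) : Int :=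
  -- col = sorted(frag[position] for frag in fragmentarray if frag[position] in "ACGT")
  -- (pyGet? none = IndexError, excluded by Pre_)
  let col := PySem.List.sorted
    (fragmentarray.filterMap (fun frag =>
      match PySem.Str.pyGet? frag position with
      | some c => if "ACGT".toList.contains c then some c else none
      | none => none))
    (fun c => c) false
  match (consensusRuns col (none, 0)).1 with
  | none => 0
  -- "ACGT".index(best_base): best_base is always one of A/C/G/T, so .index never raises
  | some b => (((PySem.List.index? "ACGT".toList b).getD 0 : Nat) : Int)

-- ===== PRECONDITION & SPEC =====
-- Pre_ excludes exactly the inputs where Python raises IndexError: some fragment shorter than the index.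
def Pre_consensuscount (fragmentarray : List String) (position : Int) : Prop :=
  ∀ frag ∈ fragmentarray, PySem.Raise.InRange frag.toList.length position

instance (fragmentarray : List String) (position : Int) : Decidable (Pre_consensuscount fragmentarray position) := by
  unfold Pre_consensuscount; infer_instance

def pvWitness_consensuscount : List String × Int := (["ACGT", "ACCA", "TGCA"], 2)

def Spec_consensuscount (fragmentarray : List String) (position : Int) (out : Int) : Prop := out = consensuscount_alt fragmentarray position
instance (fragmentarray : List String) (position : Int) (out : Int) : Decidable (Spec_consensuscount fragmentarray position out) := by unfold Spec_consensuscount; infer_instance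

-- ===== CLAIM (what is proved, stated in full; the proofs are below) =====
def Claim_equal_consensuscount : Prop := ∀ (fragmentarray : List String) (position : Int), Dom_consensuscount fragmentarray position → Pre_consensuscount fragmentarray position → Spec_consensuscount fragmentarray position (consensuscount fragmentarray position)

-- ===== LEMMAS AND PROOFS =====

-- ---- A side: the fold computes the four column counts ----

-- number of fragments whose character at `position` is b
def colCount (fragmentarray : List String) (position : Int) (b : Char) : Int :=
  (List.count (some b) (fragmentarray.map (fun frag => PySem.Str.pyGet? frag position)) : Int)

theorem consensusStep_eq (position : Int) (a c g t : Int) (f : String) (ch : Char)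
    (hch : PySem.Str.pyGet? f position = some ch) :
    consensusStep position [a, c, g, t] f =
      [a + (if ch == 'A' then 1 else 0), c + (if ch == 'C' then 1 else 0),
       g + (if ch == 'G' then 1 else 0), t + (if ch == 'T' then 1 else 0)] := by
  simp only [consensusStep, hch]
  by_cases hA : ch = 'A'
  · subst hA; simp
  · by_cases hC : ch = 'C'
    · subst hC; simp
    · by_cases hG : ch = 'G'
      · subst hG; simp
      · by_cases hT : ch = 'T'
        · subst hT; simp
        · simp [hA, hC, hG, hT]

theorem colCount_cons (f : String) (rest : List String) (position : Int) (b ch : Char)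
    (hch : PySem.Str.pyGet? f position = some ch) :
    colCount (f :: rest) position b = (if ch == b then 1 else 0) + colCount rest position b := by
  simp only [colCount, List.map_cons, List.count_cons, hch]
  by_cases hb : ch = b <;> simp [hb] <;> omega

theorem consensus_foldl (fragmentarray : List String) (position : Int)
    (h : ∀ frag ∈ fragmentarray, PySem.Raise.InRange frag.toList.length position)
    (a c g t : Int) :
    fragmentarray.foldl (consensusStep position) [a, c, g, t] =
      [a + colCount fragmentarray position 'A',
       c + colCount fragmentarray position 'C',
       g + colCount fragmentarray position 'G',
       t + colCount fragmentarray position 'T'] := by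
  induction fragmentarray generalizing a c g t with
  | nil => simp [colCount]
  | cons f rest ih =>
    have hf := h f (by simp)
    obtain ⟨ch, hch⟩ : ∃ x, PySem.Str.pyGet? f position = some x := by
      rcases he : PySem.Str.pyGet? f position with _ | x
      · simp [PySem.List.pyGet?_eq_none_iff] at he; exact absurd hf he
      · exact ⟨x, rfl⟩
    have hrest : ∀ frag ∈ rest, PySem.Raise.InRange frag.toList.length position :=
      fun frag hm => h frag (by simp [hm])
    rw [List.foldl_cons, consensusStep_eq position a c g t f ch hch, ih hrest,
        colCount_cons f rest position 'A' ch hch, colCount_cons f rest position 'C' ch hch,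
        colCount_cons f rest position 'G' ch hch, colCount_cons f rest position 'T' ch hch]
    simp [add_assoc]

-- ---- A side: basecount.index(max(basecount)) on a 4-list, as an explicit argmax ----

theorem argmaxA (a c g t : Int) :
    (((PySem.List.index? [a,c,g,t] ((PySem.List.max? [a,c,g,t] (fun x => x)).getD 0)).getD 0 : Nat) : Int)
    = if c ≤ a ∧ g ≤ a ∧ t ≤ a then 0 else if g ≤ c ∧ t ≤ c then 1 else if t ≤ g then 2 else 3 := by
  rw [PySem.List.max?_id_cons]
  have hm : [c,g,t].foldl max a = max (max (max a c) g) t := by simp [List.foldl]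
  rw [hm]
  set m := max (max (max a c) g) t with hm'
  have h4 : ∀ x y z w : Int, List.idxOf? m [x,y,z,w] =
      if x = m then some 0 else if y = m then some 1 else if z = m then some 2 else if w = m then some 3 else none := by
    intro x y z w
    simp only [List.idxOf?, List.findIdx?_cons, beq_iff_eq]
    split_ifs <;> rfl
  simp only [Option.getD_some, PySem.List.index?_eq_idxOf?, h4]
  split_ifs <;> simp only [Option.getD_some, Option.getD_none] <;> omega

-- ---- B side: the filtered column ----

theorem mem_filterCol (fragmentarray : List String) (position : Int) (x : Char)
    (hx : x ∈ fragmentarray.filterMap (fun frag =>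
      match PySem.Str.pyGet? frag position with
      | some c => if "ACGT".toList.contains c then some c else none
      | none => none)) :
    x ∈ ['A','C','G','T'] := by
  rw [List.mem_filterMap] at hx
  obtain ⟨f, -, hf⟩ := hx
  rcases he : PySem.Str.pyGet? f position with _ | c <;> rw [he] at hf
  · exact absurd hf (by simp)
  · simp only [Option.ite_none_right_eq_some, Option.some.injEq] at hf
    obtain ⟨hc, rfl⟩ := hf
    simpa using hc

theorem count_filterCol (fragmentarray : List String) (position : Int)
    (h : ∀ frag ∈ fragmentarray, PySem.Raise.InRange frag.toList.length position)
    (b : Char) (hb : "ACGT".toList.contains b = true) :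
    List.count b (fragmentarray.filterMap (fun frag =>
      match PySem.Str.pyGet? frag position with
      | some c => if "ACGT".toList.contains c then some c else none
      | none => none))
    = List.count (some b) (fragmentarray.map (fun frag => PySem.Str.pyGet? frag position)) := by
  induction fragmentarray with
  | nil => simp
  | cons f rest ih =>
    have hf := h f (by simp)
    obtain ⟨ch, hch⟩ : ∃ x, PySem.Str.pyGet? f position = some x := by
      rcases he : PySem.Str.pyGet? f position with _ | x
      · simp [PySem.List.pyGet?_eq_none_iff] at he; exact absurd hf he
      · exact ⟨x, rfl⟩
    have ih' := ih (fun frag hm => h frag (by simp [hm]))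
    rw [List.filterMap_cons, List.map_cons, hch]
    dsimp only
    by_cases hc : "ACGT".toList.contains ch = true
    · simp only [hc, if_pos, List.count_cons, ih']
      by_cases he : ch = b <;> simp [he]
    · have hne : ch ≠ b := fun hcb => hc (hcb ▸ hb)
      rw [if_neg hc, ih', List.count_cons]
      simp [hne]

-- ---- B side: sorted A/C/G/T characters are four replicate blocks in "ACGT" order ----

theorem sortedBlocks (l : List Char) (h : ∀ x ∈ l, x ∈ ['A','C','G','T']) :
    PySem.List.sorted l (fun c => c) false =
      List.replicate (l.count 'A') 'A' ++ (List.replicate (l.count 'C') 'C' ++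
        (List.replicate (l.count 'G') 'G' ++ List.replicate (l.count 'T') 'T')) := by
  apply PySem.List.sorted_id_eq_of_perm_of_pairwise
  · rw [List.perm_iff_count]
    intro a
    by_cases ha : a ∈ ['A','C','G','T']
    · fin_cases ha <;> simp [List.count_append, List.count_replicate]
    · have h0 : l.count a = 0 := by
        rw [List.count_eq_zero]; intro hmem; exact ha (h a hmem)
      rw [h0]
      simp only [List.mem_cons, List.not_mem_nil, or_false, not_or] at ha
      obtain ⟨h1, h2, h3, h4⟩ := ha
      simp [List.count_append, List.count_replicate, Ne.symm h1, Ne.symm h2, Ne.symm h3, Ne.symm h4]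
  · simp only [List.pairwise_append, List.pairwise_replicate, List.mem_append, List.mem_replicate]
    refine ⟨Or.inr le_rfl, ⟨Or.inr le_rfl, ⟨Or.inr le_rfl, Or.inr le_rfl, ?_⟩, ?_⟩, ?_⟩
    · rintro a ⟨-, rfl⟩ b ⟨-, rfl⟩; decide
    · rintro a ⟨-, rfl⟩ b (⟨-, rfl⟩ | ⟨-, rfl⟩) <;> decide
    · rintro a ⟨-, rfl⟩ b (⟨-, rfl⟩ | ⟨-, rfl⟩ | ⟨-, rfl⟩) <;> decide

-- ---- B side: evaluating the run scan over the four blocks ----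

theorem takeWhile_replicate_append (c : Char) (rest : List Char)
    (h : rest.takeWhile (fun x => x == c) = []) (k : Nat) :
    (List.replicate k c ++ rest).takeWhile (fun x => x == c) = List.replicate k c := by
  induction k with
  | zero => simpa using h
  | succ k ih => simp [List.replicate_succ, ih]

theorem dropWhile_replicate_append (c : Char) (rest : List Char)
    (h : rest.dropWhile (fun x => x == c) = rest) (k : Nat) :
    (List.replicate k c ++ rest).dropWhile (fun x => x == c) = rest := by
  induction k with
  | zero => simpa using h
  | succ k ih => simp [List.replicate_succ, ih]

theorem consensusRuns_replicate (n : Nat) (c : Char) (rest : List Char)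
    (hn : 0 < n) (h : ∀ x ∈ rest, x ≠ c) (b : Option Char) (m : Int) :
    consensusRuns (List.replicate n c ++ rest) (b, m) =
      consensusRuns rest (if (n:Int) > m then (some c, (n:Int)) else (b, m)) := by
  have htw : rest.takeWhile (fun x => x == c) = [] := by
    cases rest with
    | nil => rfl
    | cons y ys => simp [List.takeWhile_cons, h y (by simp)]
  have hdw : rest.dropWhile (fun x => x == c) = rest := by
    cases rest with
    | nil => rfl
    | cons y ys => simp [List.dropWhile_cons, h y (by simp)]
  obtain ⟨k, rfl⟩ : ∃ k, n = k + 1 := ⟨n - 1, by omega⟩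
  rw [List.replicate_succ, List.cons_append, consensusRuns]
  rw [takeWhile_replicate_append c rest htw, dropWhile_replicate_append c rest hdw]
  simp only [List.length_replicate]
  norm_num [add_comm]

theorem runsBlock (n : Nat) (c : Char) (rest : List Char)
    (h : ∀ x ∈ rest, x ≠ c) (st : Option Char × Int) (hm : 0 ≤ st.2) :
    consensusRuns (List.replicate n c ++ rest) st =
      consensusRuns rest (if (n:Int) > st.2 then (some c, (n:Int)) else st) := by
  obtain ⟨b, m⟩ := st
  rcases Nat.eq_zero_or_pos n with hn | hn
  · subst hn
    simp only [List.replicate_zero, List.nil_append]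
    have : ¬ ((0:Int) > m) := by simpa using hm
    simp [this]
  · exact consensusRuns_replicate n c rest hn h b m

theorem runsResult (nA nC nG nT : Nat) :
    (match (consensusRuns (List.replicate nA 'A' ++ (List.replicate nC 'C' ++ (List.replicate nG 'G' ++ List.replicate nT 'T'))) (none, 0)).1 with
     | none => (0:Int)
     | some b => (((PySem.List.index? "ACGT".toList b).getD 0 : Nat) : Int))
    = if (nC:Int) ≤ nA ∧ (nG:Int) ≤ nA ∧ (nT:Int) ≤ nA then 0
      else if (nG:Int) ≤ nC ∧ (nT:Int) ≤ nC then 1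
      else if (nT:Int) ≤ nG then 2 else 3 := by
  have hnn : ∀ (cnd : Prop) [Decidable cnd] (x : Char) (k : Nat) (st : Option Char × Int),
      0 ≤ st.2 → 0 ≤ (if cnd then (some x, (k:Int)) else st).2 := by
    intro cnd _ x k st hst; split
    · exact Int.natCast_nonneg k
    · exact hst
  rw [runsBlock nA 'A' _ (by intro x hx; simp [List.mem_append, List.mem_replicate] at hx; rcases hx with ⟨-,rfl⟩|⟨-,rfl⟩|⟨-,rfl⟩ <;> decide) (none, (0:Int)) (by simp)]
  rw [runsBlock nC 'C' _ (by intro x hx; simp [List.mem_append, List.mem_replicate] at hx; rcases hx with ⟨-,rfl⟩|⟨-,rfl⟩ <;> decide) _ (hnn _ _ _ _ (by simp))]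
  rw [runsBlock nG 'G' _ (by intro x hx; simp [List.mem_replicate] at hx; rcases hx with ⟨-,rfl⟩; decide) _ (hnn _ _ _ _ (hnn _ _ _ _ (by simp)))]
  rw [← List.append_nil (List.replicate nT 'T')]
  rw [runsBlock nT 'T' [] (by simp) _ (hnn _ _ _ _ (hnn _ _ _ _ (hnn _ _ _ _ (by simp))))]
  rw [consensusRuns]
  have iA : (((PySem.List.index? "ACGT".toList 'A').getD 0 : Nat) : Int) = 0 := by decide
  have iC : (((PySem.List.index? "ACGT".toList 'C').getD 0 : Nat) : Int) = 1 := by decide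
  have iG : (((PySem.List.index? "ACGT".toList 'G').getD 0 : Nat) : Int) = 2 := by decide
  have iT : (((PySem.List.index? "ACGT".toList 'T').getD 0 : Nat) : Int) = 3 := by decide
  split_ifs <;> dsimp only <;> first
    | omega
    | (simp only [iA, iC, iG, iT]; omega)

-- ===== VERDICT (by name: the statement is the Claim_ definition above) =====
theorem consensuscount_spec : Claim_equal_consensuscount := by
  intro fragmentarray position _ hpre
  show _ = _
  unfold consensuscount consensuscount_alt
  rw [consensus_foldl fragmentarray position hpre 0 0 0 0]
  simp only [zero_add]
  rw [argmaxA]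
  rw [sortedBlocks _ (mem_filterCol fragmentarray position)]
  rw [count_filterCol fragmentarray position hpre 'A' (by decide),
      count_filterCol fragmentarray position hpre 'C' (by decide),
      count_filterCol fragmentarray position hpre 'G' (by decide),
      count_filterCol fragmentarray position hpre 'T' (by decide)]
  rw [runsResult]
  simp only [colCount]
  rfl
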